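-- pv_equiv track=rewrite | github.com/denizen-star/hunter | app/services/networking_processor.py | _clean_profile_details
-- ===== SOURCE A (Python) =====
-- def _clean_profile_details(profile_text: str) -> str:
--     """Remove LinkedIn metadata and clutter from profile details"""
--     lines = profile_text.split('\n')
--     cleaned_lines = []
--
--     # Skip LinkedIn metadata patterns (similar to job description cleaning)
--     skip_patterns = [
--         'Skip to main content',
--         'LinkedIn',
--         'Sign in',
--         'Join now',
--         'Connect',
--         'Follow',
--         'Message',
--         'More',
--         'About',
--         'Activity',
--         'Experience',
--         'Education',
--         'Show all',
--         'Show less',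
--         'connections',
--         'followers',
--         'Mutual connections'
--     ]
--
--     for line in lines:
--         line = line.strip()
--
--         if not line:
--             continue
--
--         # Skip lines that match skip patterns
--         should_skip = False
--         for pattern in skip_patterns:
--             # Only skip if the line is EXACTLY the pattern (not if pattern appears in longer text)
--             if line.lower() == pattern.lower():
--                 should_skip = True
--                 break
--
--         # Skip very short lines (likely navigation)
--         if len(line) <= 3:
--             should_skip = True
--
--         if not should_skip:
--             cleaned_lines.append(line)
--
--     # Remove duplicate consecutive lines
--     final_lines = []
--     prev_line = ""
--     for line in cleaned_lines:
--         if line != prev_line: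
--             final_lines.append(line)
--             prev_line = line
--
--     cleaned = '\n'.join(final_lines)
--     return cleaned
-- ===== SOURCE B (Python) =====
-- _SKIP = {p.lower() for p in [
--     'Skip to main content', 'LinkedIn', 'Sign in', 'Join now', 'Connect',
--     'Follow', 'Message', 'More', 'About', 'Activity', 'Experience',
--     'Education', 'Show all', 'Show less', 'connections', 'followers',
--     'Mutual connections']}
--
--
-- def _clean_profile_details(profile_text: str) -> str:
--     """Build the result back-to-front: walk the lines in REVERSE order and keep a
--     surviving line only when it differs from the most recently kept line (which,
--     in reverse order, is the NEXT kept line of the original text).  Collapsing a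
--     run of equal consecutive kept lines keeps one representative of the run, so
--     the traversal direction does not change the result."""
--     rev = []
--     for raw in reversed(profile_text.split('\n')):
--         line = raw.strip()
--         if len(line) <= 3 or line.lower() in _SKIP:
--             continue
--         if not rev or line != rev[-1]:
--             rev.append(line)
--     return '\n'.join(reversed(rev))
-- ===== Notes on version B (the rewrite author's own statement) =====
-- stated objective: alternative
-- what changed: Replaces A's two forward passes (pattern-list filter building cleaned_lines, then a forward consecutive-dedup keyed on the previous kept line with a "" sentinel) by a single REVERSE traversal that builds the output back-to-front, keeping a surviving line only when it differs from the next kept line (the tail of the reversed accumulator), then reverses once at the end; correct because collapsing a run of equal lines keeps one representative regardless of direction.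
import Mathlib
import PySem

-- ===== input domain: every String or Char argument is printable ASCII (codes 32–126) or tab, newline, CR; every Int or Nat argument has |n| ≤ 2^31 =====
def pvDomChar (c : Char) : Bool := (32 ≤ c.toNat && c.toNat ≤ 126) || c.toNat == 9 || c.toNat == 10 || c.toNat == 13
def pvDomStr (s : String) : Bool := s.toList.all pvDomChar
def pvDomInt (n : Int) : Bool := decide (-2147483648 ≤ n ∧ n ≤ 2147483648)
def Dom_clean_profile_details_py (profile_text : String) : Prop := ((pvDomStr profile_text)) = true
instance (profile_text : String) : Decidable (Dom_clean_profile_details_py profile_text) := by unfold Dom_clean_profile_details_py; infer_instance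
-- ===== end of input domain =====

-- B builds the result BACK-TO-FRONT: one reverse traversal that filters and collapses runs
-- by comparing each surviving line with the next kept line, instead of A's two forward passes
-- (objective: alternative).


-- ===== PORT A =====
def pv_skip_patterns : List String :=
  ["Skip to main content", "LinkedIn", "Sign in", "Join now", "Connect",
   "Follow", "Message", "More", "About", "Activity", "Experience",
   "Education", "Show all", "Show less", "connections", "followers",
   "Mutual connections"]

def clean_profile_details_py (profile_text : String) : String :=
  let lines := (PySem.Str.split? profile_text "\n").getD []
  let cleaned_lines := lines.foldl (fun acc raw =>
    let line := PySem.Str.strip raw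
    if line == "" then acc
    else
      -- inner 'for pattern in skip_patterns: … break' computing should_skip
      let should_skip := pv_skip_patterns.any (fun p => PySem.Str.lower line == PySem.Str.lower p)
      let should_skip := if PySem.Str.len line ≤ 3 then true else should_skip
      if !should_skip then acc ++ [line] else acc) []
  let final_lines := (cleaned_lines.foldl (fun (st : List String × String) line =>
      if line != st.2 then (st.1 ++ [line], line) else st) ([], "")).1
  PySem.Str.join "\n" final_lines

-- ===== PORT B =====
def pv_skip_set : List String :=
  ["skip to main content", "linkedin", "sign in", "join now", "connect",
   "follow", "message", "more", "about", "activity", "experience",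
   "education", "show all", "show less", "connections", "followers",
   "mutual connections"]

def clean_profile_details_py_alt (profile_text : String) : String :=
  let rev := (((PySem.Str.split? profile_text "\n").getD []).reverse).foldl
    (fun (rev : List String) raw =>
      let line := PySem.Str.strip raw
      if PySem.Str.len line ≤ 3 || pv_skip_set.any (fun q => PySem.Str.lower line == q) then rev
      else
        -- 'if not rev or line != rev[-1]: rev.append(line)'
        match rev.getLast? with
        | none => rev ++ [line]
        | some last => if line != last then rev ++ [line] else rev)
    []
  PySem.Str.join "\n" rev.reverse

-- ===== PRECONDITION & SPEC =====
def Spec_clean_profile_details_py (profile_text : String) (out : String) : Prop := out = clean_profile_details_py_alt profile_text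
instance (profile_text : String) (out : String) : Decidable (Spec_clean_profile_details_py profile_text out) := by unfold Spec_clean_profile_details_py; infer_instance

-- ===== CLAIM (what is proved, stated in full; the proofs are below) =====
def Claim_equal_clean_profile_details_py : Prop := ∀ (profile_text : String), Dom_clean_profile_details_py profile_text → Spec_clean_profile_details_py profile_text (clean_profile_details_py profile_text)

-- ===== LEMMAS AND PROOFS =====

-- the shared per-line keep test (B's skip condition, negated)
def pvKeep (l : String) : Bool :=
  !(PySem.Str.len l ≤ 3 || pv_skip_set.any (fun q => PySem.Str.lower l == q))

-- named copies of the loop bodies (definitionally equal to the ports' lambdas)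
def pvAStepFn (acc : List String) (raw : String) : List String :=
  let line := PySem.Str.strip raw
  if line == "" then acc
  else
    let should_skip := pv_skip_patterns.any (fun p => PySem.Str.lower line == PySem.Str.lower p)
    let should_skip := if PySem.Str.len line ≤ 3 then true else should_skip
    if !should_skip then acc ++ [line] else acc

def pvDedupStr (st : List String × String) (line : String) : List String × String :=
  if line != st.2 then (st.1 ++ [line], line) else st

def pvBStepFn (rev : List String) (raw : String) : List String :=
  let line := PySem.Str.strip raw
  if PySem.Str.len line ≤ 3 || pv_skip_set.any (fun q => PySem.Str.lower line == q) then rev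
  else
    match rev.getLast? with
    | none => rev ++ [line]
    | some last => if line != last then rev ++ [line] else rev

-- B's inner branch on an accumulated (reversed-order) list
def pvRevStep (rev : List String) (line : String) : List String :=
  match rev.getLast? with
  | none => rev ++ [line]
  | some last => if line != last then rev ++ [line] else rev

-- forward run-collapse with an optional last-seen line (cons-style reference function)
def pvFwd : Option String → List String → List String
  | _, [] => []
  | none, x :: t => x :: pvFwd (some x) t
  | some a, x :: t => if x == a then pvFwd (some a) t else x :: pvFwd (some x) t

-- A's dedup step on state (kept lines, optional last kept line)
def pvDedupO (st : List String × Option String) (line : String) : List String × Option String :=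
  match st.2 with
  | none => (st.1 ++ [line], some line)
  | some last => if line != last then (st.1 ++ [line], some line) else st

lemma pv_skip_set_eq : pv_skip_set = pv_skip_patterns.map PySem.Str.lower := by decide

lemma pv_len_empty_le : PySem.Str.len "" ≤ 3 := by decide

-- A's per-line filter body is 'append iff pvKeep'
lemma pvA_step (acc : List String) (raw : String) :
    pvAStepFn acc raw = (if pvKeep (PySem.Str.strip raw) then acc ++ [PySem.Str.strip raw] else acc) := by
  unfold pvAStepFn
  simp only [pvKeep, pv_skip_set_eq, List.any_map]
  set l := PySem.Str.strip raw with hl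
  by_cases h3 : PySem.Str.len l ≤ 3
  · by_cases he : l = ""
    · simp [he]
    · simp [he]
  · have he : ¬ (l = "") := by
      intro h; exact h3 (h ▸ pv_len_empty_le)
    simp [he, Function.comp_def]

-- A's filter loop collects the stripped lines passing pvKeep
lemma pvA_fold (lines : List String) (acc : List String) :
    List.foldl pvAStepFn acc lines
      = acc ++ (lines.filter (fun raw => pvKeep (PySem.Str.strip raw))).map PySem.Str.strip := by
  induction lines generalizing acc with
  | nil => simp
  | cons x t ih =>
    rw [List.foldl_cons, pvA_step, List.filter_cons]
    by_cases hk : pvKeep (PySem.Str.strip x)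
    · rw [if_pos hk, if_pos hk, ih]; simp
    · rw [if_neg hk, if_neg (by simpa using hk), ih]

-- every kept line is nonempty (pvKeep forces length > 3)
lemma pv_kept_ne_empty (lines : List String) :
    ∀ x ∈ (lines.filter (fun raw => pvKeep (PySem.Str.strip raw))).map PySem.Str.strip,
      x ≠ "" := by
  intro x hx hxe
  rcases List.mem_map.1 hx with ⟨raw, hraw, hstrip⟩
  have hk := List.of_mem_filter hraw
  rw [hstrip, hxe] at hk
  simp only [pvKeep, Bool.not_eq_true', Bool.or_eq_false_iff, decide_eq_false_iff_not] at hk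
  exact hk.1 pv_len_empty_le

-- A's dedup fold with string sentinel prev equals the Option fold with 'some prev'
lemma pv_dedup_some (cl : List String) (acc : List String) (prev : String) :
    List.foldl pvDedupStr (acc, prev) cl
      = ((cl.foldl pvDedupO (acc, some prev)).1,
         (cl.foldl pvDedupO (acc, some prev)).2.getD "") := by
  induction cl generalizing acc prev with
  | nil => rfl
  | cons x t ih =>
    rw [List.foldl_cons, List.foldl_cons]
    have hO : pvDedupO (acc, some prev) x
        = if (x != prev) = true then (acc ++ [x], some x) else (acc, some prev) := by
      simp only [pvDedupO]
    have hA : pvDedupStr (acc, prev) x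
        = if (x != prev) = true then (acc ++ [x], x) else (acc, prev) := rfl
    rw [hO, hA]
    by_cases h : (x != prev) = true
    · rw [if_pos h, if_pos h]; exact ih _ _
    · rw [if_neg h, if_neg h]; exact ih _ _

-- on nonempty lines, A's "" sentinel behaves like an Option 'none' sentinel
lemma pv_dedup_none (cl : List String) (hne : ∀ x ∈ cl, x ≠ "") :
    (List.foldl pvDedupStr ([], "") cl).1 = (cl.foldl pvDedupO ([], none)).1 := by
  cases cl with
  | nil => rfl
  | cons x t =>
    have hx : x ≠ "" := hne x (by simp)
    rw [List.foldl_cons, List.foldl_cons]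
    have h1 : pvDedupStr ([], "") x = ([x], x) := by
      unfold pvDedupStr; rw [if_pos (by simpa using hx)]; simp
    have h2 : pvDedupO ([], none) x = ([x], some x) := by simp [pvDedupO]
    rw [h1, h2, pv_dedup_some]

-- A's Option dedup fold is the cons-style forward run-collapse
lemma pv_dedupO_fwd (cl : List String) (acc : List String) (last : Option String) :
    (cl.foldl pvDedupO (acc, last)).1 = acc ++ pvFwd last cl := by
  induction cl generalizing acc last with
  | nil => simp [pvFwd]
  | cons x t ih =>
    rw [List.foldl_cons]
    cases last with
    | none =>
      have : pvDedupO (acc, none) x = (acc ++ [x], some x) := rfl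
      rw [this, ih]; simp [pvFwd]
    | some a =>
      by_cases h : x = a
      · subst h
        have : pvDedupO (acc, some x) x = (acc, some x) := by simp [pvDedupO]
        rw [this, ih]; simp [pvFwd]
      · have : pvDedupO (acc, some a) x = (acc ++ [x], some x) := by
          simp [pvDedupO, h]
        rw [this, ih]; simp [pvFwd, h]

-- B's fused step is 'if pvKeep then pvRevStep else skip'
lemma pvB_step (rev : List String) (raw : String) :
    pvBStepFn rev raw
      = (if pvKeep (PySem.Str.strip raw) then pvRevStep rev (PySem.Str.strip raw) else rev) := by
  by_cases h3 : (PySem.Chars.strip raw.toList).length ≤ 3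
  · have h3' : ¬ (3 < (PySem.Chars.strip raw.toList).length) := by omega
    simp [pvBStepFn, pvKeep, h3]
  · by_cases hm : PySem.Str.lower (PySem.Str.strip raw) ∈ pv_skip_set
    · simp [pvBStepFn, pvRevStep, pvKeep, h3]
      rw [if_pos hm, if_neg (fun hf => hf _ hm rfl)]
    · have hf : ∀ x ∈ pv_skip_set, ¬ PySem.Str.lower (PySem.Str.strip raw) = x :=
        fun x hx he => hm (he ▸ hx)
      simp [pvBStepFn, pvRevStep, pvKeep, h3]
      rw [if_neg hm, if_pos hf]

-- B's loop is the pvRevStep fold over the filtered, stripped lines (same traversal order)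
lemma pvB_fold (lines : List String) (rev : List String) :
    List.foldl pvBStepFn rev lines
      = ((lines.filter (fun raw => pvKeep (PySem.Str.strip raw))).map PySem.Str.strip).foldl pvRevStep rev := by
  induction lines generalizing rev with
  | nil => simp
  | cons x t ih =>
    rw [List.foldl_cons, pvB_step, List.filter_cons]
    by_cases hk : pvKeep (PySem.Str.strip x)
    · rw [if_pos hk, if_pos hk, ih, List.map_cons, List.foldl_cons]
    · rw [if_neg hk, if_neg (by simpa using hk), ih]

-- continuing the forward run-collapse from a seen line a: drop the head of the fresh
-- run-collapse when it equals a, keep it unchanged otherwise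
lemma pv_fwd_some (l : List String) (a : String) :
    pvFwd (some a) l = (if (pvFwd none l).head? = some a then (pvFwd none l).tail else pvFwd none l) := by
  cases l with
  | nil => simp [pvFwd]
  | cons y t =>
    by_cases h : y = a
    · subst h
      simp [pvFwd]
    · have hb : (y == a) = false := by simp [h]
      simp [pvFwd, hb, h]

-- the reversed back-to-front accumulation equals the forward run-collapse
lemma pv_rev_fwd (cl : List String) :
    (cl.reverse.foldl pvRevStep []).reverse = pvFwd none cl := by
  induction cl with
  | nil => rfl
  | cons x t ih =>
    rw [List.reverse_cons, List.foldl_append, List.foldl_cons, List.foldl_nil]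
    set r := t.reverse.foldl pvRevStep [] with hr
    have hlast : r.getLast? = (pvFwd none t).head? := by
      rw [← ih, List.head?_reverse]
    cases hf : pvFwd none t with
    | nil =>
      have hrnil : r = [] := by
        have : r.reverse = [] := by rw [ih, hf]
        simpa using this
      have hx : pvFwd (some x) t = [] := by
        rw [pv_fwd_some, hf]; simp
      simp [pvRevStep, hrnil, pvFwd, hx]
    | cons h rest =>
      have hlast' : r.getLast? = some h := by rw [hlast, hf]; rfl
      by_cases hxh : x = h
      · subst hxh
        have : pvRevStep r x = r := by
          simp [pvRevStep, hlast']
        rw [this, ih, hf]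
        have hx : pvFwd (some x) t = rest := by
          rw [pv_fwd_some, hf]; simp
        simp [pvFwd, hx]
      · have : pvRevStep r x = r ++ [x] := by
          simp [pvRevStep, hlast', hxh]
        rw [this, List.reverse_append, ih, hf]
        have hx : pvFwd (some x) t = h :: rest := by
          rw [pv_fwd_some, hf]
          simp [Ne.symm hxh]
        simp [pvFwd, hx]

-- ===== VERDICT (by name: the statement is the Claim_ definition above) =====
theorem clean_profile_details_py_spec : Claim_equal_clean_profile_details_py := by
  intro s _
  show PySem.Str.join "\n"
      (List.foldl pvDedupStr ([], "")
        (List.foldl pvAStepFn [] ((PySem.Str.split? s "\n").getD []))).1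
    = PySem.Str.join "\n"
      (List.foldl pvBStepFn [] ((PySem.Str.split? s "\n").getD []).reverse).reverse
  set lines := (PySem.Str.split? s "\n").getD [] with hln
  rw [pvA_fold, pvB_fold]
  rw [List.nil_append]
  set cl := (lines.filter (fun raw => pvKeep (PySem.Str.strip raw))).map PySem.Str.strip with hcl
  have hfm : (lines.reverse.filter (fun raw => pvKeep (PySem.Str.strip raw))).map PySem.Str.strip
      = cl.reverse := by
    rw [hcl, List.filter_reverse, List.map_reverse]
  rw [hfm]
  rw [pv_dedup_none cl (pv_kept_ne_empty lines), pv_dedupO_fwd, List.nil_append, pv_rev_fwd]
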